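-- pv_equiv track=rewrite | github.com/thatsimo/library_management | core/library/serializers.py | set_null_for_unrelated_fields
-- ===== SOURCE A (Python) =====
-- def set_null_for_unrelated_fields(validated_data):
--     """Ensures unrelated fields are explicitly set to NULL (None)."""
--     book_type = validated_data.get("book_type")
--
--     null_fields = {
--         "printed": {"duration": None, "file_format": None},
--         "ebook": {"pages": None, "duration": None},
--         "audiobook": {"pages": None, "file_format": None},
--     }
--
--     # Set unrelated fields to NULL
--     for field, value in null_fields.get(book_type, {}).items():
--         validated_data[field] = value
--
--     return validated_data
-- ===== SOURCE B (Python) =====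
-- _NULL_FIELDS = {
--     "printed": ("duration", "file_format"),
--     "ebook": ("pages", "duration"),
--     "audiobook": ("pages", "file_format"),
-- }
--
--
-- def set_null_for_unrelated_fields(validated_data):
--     """Rebuild the dict in one pass, nulling the fields unrelated to the book type.
--
--     Unlike A (which mutates validated_data in place), this returns a fresh dict;
--     the return value is identical, including key order.
--     """
--     to_null = _NULL_FIELDS.get(validated_data.get("book_type"), ())
--     result = {k: (None if k in to_null else v) for k, v in validated_data.items()}
--     for field in to_null:
--         result.setdefault(field, None)
--     return result
-- ===== Notes on version B (the rewrite author's own statement) =====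
-- stated objective: alternative
-- what changed: A point-updates the existing dict field by field from a per-type table of null assignments; B instead rebuilds the dict in a single comprehension pass over the items, nulling any field in the unrelated-field set, then setdefaults the absent unrelated fields.
import Mathlib
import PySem

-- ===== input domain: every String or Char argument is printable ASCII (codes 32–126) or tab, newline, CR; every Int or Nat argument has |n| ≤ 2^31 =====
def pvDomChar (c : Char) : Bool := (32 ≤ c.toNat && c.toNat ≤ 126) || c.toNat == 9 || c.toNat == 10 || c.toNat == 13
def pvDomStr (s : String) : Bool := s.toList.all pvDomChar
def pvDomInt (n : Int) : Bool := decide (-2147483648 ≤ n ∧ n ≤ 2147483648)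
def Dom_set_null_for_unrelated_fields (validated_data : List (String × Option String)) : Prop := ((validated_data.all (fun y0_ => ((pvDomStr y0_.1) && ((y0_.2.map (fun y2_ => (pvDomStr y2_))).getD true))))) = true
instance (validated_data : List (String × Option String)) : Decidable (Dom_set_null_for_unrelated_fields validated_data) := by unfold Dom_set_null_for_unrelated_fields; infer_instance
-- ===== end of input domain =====

-- B rebuilds the dict in one pass over its items (nulling every field in the unrelated-field
-- set, then setdefault-ing absent ones) instead of A's per-field point updates (objective:
-- alternative). Python A mutates validated_data in place while B returns a fresh dict; the
-- equivalence proved is about the return value.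

-- `d.get(k)` : first match, default None.
def dictGet (d : List (String × Option String)) (k : String) : Option String :=
  match d.find? (fun p => p.1 = k) with
  | some p => p.2
  | none => none

-- ===== PORT A =====
-- `d[k] = v` : overwrite first matching key in place, else append.
def dictSet (d : List (String × Option String)) (k : String) (v : Option String) : List (String × Option String) :=
  match d with
  | [] => [(k, v)]
  | (k', v') :: rest => if k' = k then (k', v) :: rest else (k', v') :: dictSet rest k v

def set_null_for_unrelated_fields (validated_data : List (String × Option String)) : List (String × Option String) :=
  let book_type := dictGet validated_data "book_type"
  -- null_fields.get(book_type, {}) : lookup in the literal dict of dicts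
  let null_items : List (String × Option String) :=
    match book_type with
    | some "printed" => [("duration", none), ("file_format", none)]
    | some "ebook" => [("pages", none), ("duration", none)]
    | some "audiobook" => [("pages", none), ("file_format", none)]
    | _ => []
  null_items.foldl (fun d p => dictSet d p.1 p.2) validated_data

-- ===== PORT B =====
-- _NULL_FIELDS.get(validated_data.get("book_type"), ())
def nullFields (bt : Option String) : List String :=
  match bt with
  | none => []
  | some s =>
    if s = "printed" then ["duration", "file_format"]
    else if s = "ebook" then ["pages", "duration"]
    else if s = "audiobook" then ["pages", "file_format"]
    else []

-- result.setdefault(field, None)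
def setDefaultNone (d : List (String × Option String)) (k : String) : List (String × Option String) :=
  if d.any (fun p => p.1 = k) then d else d ++ [(k, none)]

def set_null_for_unrelated_fields_alt (validated_data : List (String × Option String)) : List (String × Option String) :=
  let to_null := nullFields (dictGet validated_data "book_type")
  -- {k: (None if k in to_null else v) for k, v in validated_data.items()}
  -- (the input represents a Python dict, so its keys are distinct and the
  --  comprehension is exactly a map over the pairs)
  let result := validated_data.map (fun p => if p.1 ∈ to_null then (p.1, none) else p)
  to_null.foldl setDefaultNone result

-- ===== PRECONDITION & SPEC =====
-- Pre_ requires the keys of the association list to be distinct: the list represents a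
-- Python dict, which cannot hold duplicate keys, so no Python input is excluded.
def Pre_set_null_for_unrelated_fields (validated_data : List (String × Option String)) : Prop :=
  (validated_data.map Prod.fst).Nodup
instance (validated_data : List (String × Option String)) : Decidable (Pre_set_null_for_unrelated_fields validated_data) := by unfold Pre_set_null_for_unrelated_fields; infer_instance

def pvWitness_set_null_for_unrelated_fields : (List (String × Option String)) :=
  [("book_type", some "printed"), ("pages", some "100"), ("duration", some "3")]

def Spec_set_null_for_unrelated_fields (validated_data : List (String × Option String)) (out : List (String × Option String)) : Prop := out = set_null_for_unrelated_fields_alt validated_data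
instance (validated_data : List (String × Option String)) (out : List (String × Option String)) : Decidable (Spec_set_null_for_unrelated_fields validated_data out) := by unfold Spec_set_null_for_unrelated_fields; infer_instance

-- ===== CLAIM (what is proved, stated in full; the proofs are below) =====
def Claim_equal_set_null_for_unrelated_fields : Prop := ∀ (validated_data : List (String × Option String)), Dom_set_null_for_unrelated_fields validated_data → Pre_set_null_for_unrelated_fields validated_data → Spec_set_null_for_unrelated_fields validated_data (set_null_for_unrelated_fields validated_data)

-- ===== LEMMAS AND PROOFS =====

theorem dictSet_absent (d : List (String × Option String)) (a : String) (v : Option String)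
    (h : d.any (fun p => p.1 = a) = false) : dictSet d a v = d ++ [(a, v)] := by
  induction d with
  | nil => simp [dictSet]
  | cons hd t ih =>
    obtain ⟨k, w⟩ := hd
    simp only [List.any_cons, Bool.or_eq_false_iff, decide_eq_false_iff_not] at h
    simp [dictSet, h.1, ih h.2]

theorem map_id_of_absent (d : List (String × Option String)) (a : String)
    (h : d.any (fun p => p.1 = a) = false) :
    d.map (fun p => if p.1 = a then (p.1, (none : Option String)) else p) = d := by
  induction d with
  | nil => simp
  | cons hd t ih =>
    simp only [List.any_cons, Bool.or_eq_false_iff, decide_eq_false_iff_not] at h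
    simp [h.1, ih h.2]

theorem dictSet_present (d : List (String × Option String)) (a : String)
    (hnd : (d.map Prod.fst).Nodup) (h : d.any (fun p => p.1 = a) = true) :
    dictSet d a none = d.map (fun p => if p.1 = a then (p.1, none) else p) := by
  induction d with
  | nil => simp at h
  | cons hd t ih =>
    obtain ⟨k, w⟩ := hd
    rw [List.map_cons, List.nodup_cons] at hnd
    by_cases hk : k = a
    · subst hk
      have habs : t.any (fun p => p.1 = k) = false := by
        rw [List.any_eq_false]
        intro p hp
        simp only [decide_eq_true_eq]
        intro hpk
        have hmem : p.1 ∈ t.map Prod.fst := List.mem_map_of_mem hp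
        rw [hpk] at hmem
        exact hnd.1 hmem
      simp [dictSet, map_id_of_absent t k habs]
    · simp only [List.any_cons, Bool.or_eq_true, decide_eq_true_eq] at h
      rcases h with h | h
      · exact absurd h hk
      · simp [dictSet, hk, ih hnd.2 h]

theorem hasKey_map_null (d : List (String × Option String)) (F : List String) (b : String) :
    ((d.map (fun p => if p.1 ∈ F then (p.1, (none : Option String)) else p)).any
      (fun p => p.1 = b)) = d.any (fun p => p.1 = b) := by
  induction d with
  | nil => simp
  | cons hd t ih =>
    by_cases hm : hd.1 ∈ F <;> simp [hm, ih]

theorem keys_map_null (d : List (String × Option String)) (F : List String) :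
    (d.map (fun p => if p.1 ∈ F then (p.1, (none : Option String)) else p)).map Prod.fst
      = d.map Prod.fst := by
  induction d with
  | nil => simp
  | cons hd t ih =>
    by_cases hm : hd.1 ∈ F <;> simp [hm, ih]

theorem map_null_drop (d : List (String × Option String)) (a b : String)
    (h : d.any (fun p => p.1 = a) = false) :
    d.map (fun p => if p.1 = a ∨ p.1 = b then (p.1, (none : Option String)) else p)
      = d.map (fun p => if p.1 = b then (p.1, none) else p) := by
  induction d with
  | nil => simp
  | cons hd t ih =>
    simp only [List.any_cons, Bool.or_eq_false_iff, decide_eq_false_iff_not] at h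
    by_cases hb : hd.1 = b
    · simp [hb, ih h.2]
    · simp [hb, h.1, ih h.2]

-- the core lemma: two point updates on distinct fields = one-pass null + setdefaults
theorem two_fields (a b : String) (hab : a ≠ b) (d : List (String × Option String))
    (hnd : (d.map Prod.fst).Nodup) :
    dictSet (dictSet d a none) b none
      = setDefaultNone (setDefaultNone
          (d.map (fun p => if p.1 = a ∨ p.1 = b then (p.1, (none : Option String)) else p)) a) b := by
  have hmapa : (d.map (fun p => if p.1 = a ∨ p.1 = b then (p.1, (none : Option String)) else p)).any
        (fun p => p.1 = a) = d.any (fun p => p.1 = a) := by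
    have := hasKey_map_null d [a, b] a
    simpa [List.mem_cons] using this
  have hmapb : ∀ (e : List (String × Option String)),
      (e.map (fun p => if p.1 = a ∨ p.1 = b then (p.1, (none : Option String)) else p)).any
        (fun p => p.1 = b) = e.any (fun p => p.1 = b) := by
    intro e
    have := hasKey_map_null e [a, b] b
    simpa [List.mem_cons] using this
  cases ha : d.any (fun p => p.1 = a) with
  | false =>
    -- a absent: the first dictSet appends (a, none)
    rw [dictSet_absent d a none ha, map_null_drop d a b ha]
    cases hb : d.any (fun p => p.1 = b) with
    | false =>
      have hb' : (d ++ [(a, (none : Option String))]).any (fun p => p.1 = b) = false := by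
        simp [hb, hab]
      rw [dictSet_absent _ b none hb', map_id_of_absent d b hb]
      have h1 : (d.map (fun p => if p.1 = b then (p.1, (none : Option String)) else p)).any
          (fun p => p.1 = a) = false := by
        have hmn := hasKey_map_null d [b] a
        simp only [List.mem_singleton] at hmn
        rw [hmn]; exact ha
      simp only [setDefaultNone, ha, h1, Bool.false_eq_true, if_false]
      have h2 : ((d ++ [(a, (none : Option String))]).any (fun p => p.1 = b)) = false := hb'
      rw [if_neg (by simp [h2]), List.append_assoc]
    | true =>
      have hnd' : ((d ++ [(a, (none : Option String))]).map Prod.fst).Nodup := by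
        have hdisj : List.Disjoint (d.map Prod.fst)
            ([((a : String), (none : Option String))].map Prod.fst) := by
          intro x hx hx2
          simp only [List.map_cons, List.map_nil, List.mem_cons, List.not_mem_nil, or_false] at hx2
          subst hx2
          rw [List.any_eq_false] at ha
          obtain ⟨p, hp, hpa⟩ := List.mem_map.mp hx
          have := ha p hp
          simp [hpa] at this
        rw [List.map_append]
        exact hnd.append (by simp) hdisj
      have hb' : (d ++ [(a, (none : Option String))]).any (fun p => p.1 = b) = true := by
        simp [hb]
      rw [dictSet_present _ b hnd' hb']
      have h1 : (d.map (fun p => if p.1 = b then (p.1, (none : Option String)) else p)).any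
          (fun p => p.1 = a) = false := by
        have hmn := hasKey_map_null d [b] a
        simp only [List.mem_singleton] at hmn
        rw [hmn]; exact ha
      have h2 : ((d.map (fun p => if p.1 = b then (p.1, (none : Option String)) else p)
            ++ [(a, (none : Option String))]).any (fun p => p.1 = b)) = true := by
        have hmn := hasKey_map_null d [b] b
        simp only [List.mem_singleton] at hmn
        rw [List.any_append, hmn, hb]; simp
      simp only [setDefaultNone, ha, hasKey_map_null, h1, h2, if_neg, Bool.false_eq_true, if_false,
        if_true, List.map_append, List.map_cons, List.map_nil]
      simp [hab.symm]
  | true =>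
    rw [dictSet_present d a hnd ha]
    have hkeys : (d.map (fun p => if p.1 = a then (p.1, (none : Option String)) else p)).map Prod.fst
        = d.map Prod.fst := by
      have := keys_map_null d [a]
      simpa [List.mem_cons] using this
    have hnd' : ((d.map (fun p => if p.1 = a then (p.1, (none : Option String)) else p)).map Prod.fst).Nodup := by
      rw [hkeys]; exact hnd
    cases hb : d.any (fun p => p.1 = b) with
    | false =>
      have hb1 : (d.map (fun p => if p.1 = a then (p.1, (none : Option String)) else p)).any
          (fun p => p.1 = b) = false := by
        have hmn := hasKey_map_null d [a] b
        simp only [List.mem_singleton] at hmn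
        rw [hmn]; exact hb
      rw [dictSet_absent _ b none hb1]
      have hdrop : d.map (fun p => if p.1 = a ∨ p.1 = b then (p.1, (none : Option String)) else p)
          = d.map (fun p => if p.1 = a then (p.1, none) else p) := by
        apply List.map_congr_left
        intro p hp
        by_cases hA : p.1 = a
        · simp [hA]
        · have hB : p.1 ≠ b := by
            rw [List.any_eq_false] at hb
            have := hb p hp
            simpa using this
          simp [hA, hB]
      rw [hdrop]
      have hmn := hasKey_map_null d [a] a
      simp only [List.mem_singleton] at hmn
      simp [setDefaultNone, hmn, ha, hb1]
    | true =>
      have hb1 : (d.map (fun p => if p.1 = a then (p.1, (none : Option String)) else p)).any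
          (fun p => p.1 = b) = true := by
        have hmn := hasKey_map_null d [a] b
        simp only [List.mem_singleton] at hmn
        rw [hmn]; exact hb
      rw [dictSet_present _ b hnd' hb1]
      have hfuse : (d.map (fun p => if p.1 = a then (p.1, (none : Option String)) else p)).map
            (fun p => if p.1 = b then (p.1, (none : Option String)) else p)
          = d.map (fun p => if p.1 = a ∨ p.1 = b then (p.1, (none : Option String)) else p) := by
        rw [List.map_map]
        apply List.map_congr_left
        intro p _
        by_cases hA : p.1 = a <;> by_cases hB : p.1 = b <;>
          simp [hA, hB, Function.comp, hab.symm]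
      rw [hfuse]
      simp [setDefaultNone, hmapa, hmapb, ha, hb]

-- ===== VERDICT (by name: the statement is the Claim_ definition above) =====
theorem set_null_for_unrelated_fields_spec : Claim_equal_set_null_for_unrelated_fields := by
  intro vd _ hpre
  unfold Spec_set_null_for_unrelated_fields set_null_for_unrelated_fields set_null_for_unrelated_fields_alt
  cases h : dictGet vd "book_type" with
  | none => simp [nullFields]
  | some bt =>
    by_cases h1 : bt = "printed"
    · subst h1
      have := two_fields "duration" "file_format" (by decide) vd hpre
      simpa [nullFields, List.foldl, List.mem_cons] using this
    · by_cases h2 : bt = "ebook"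
      · subst h2
        have := two_fields "pages" "duration" (by decide) vd hpre
        simpa [nullFields, List.foldl, List.mem_cons] using this
      · by_cases h3 : bt = "audiobook"
        · subst h3
          have := two_fields "pages" "file_format" (by decide) vd hpre
          simpa [nullFields, List.foldl, List.mem_cons] using this
        · simp [nullFields, h1, h2, h3]
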